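-- pv_equiv track=rewrite | github.com/Atlas0079/KERN | newserver/effect_contract.py | diff_effect_types
-- ===== SOURCE A (Python) =====
-- def diff_effect_types(actual: set[str] | frozenset[str], expected: set[str] | frozenset[str], actual_name: str) -> list[str]:
-- 	actual_set = {str(x) for x in set(actual or set()) if str(x)}
-- 	expected_set = {str(x) for x in set(expected or set()) if str(x)}
-- 	missing = sorted(expected_set - actual_set)
-- 	extra = sorted(actual_set - expected_set)
-- 	out: list[str] = []
-- 	if missing:
-- 		out.append(f"{actual_name} missing effect types: {missing}")
-- 	if extra:
-- 		out.append(f"{actual_name} has unknown effect types: {extra}")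
-- 	return out
-- ===== SOURCE B (Python) =====
-- def diff_effect_types(actual, expected, actual_name):
--     a = sorted({str(x) for x in set(actual or set()) if str(x)})
--     e = sorted({str(x) for x in set(expected or set()) if str(x)})
--     missing, extra = [], []
--     i = j = 0
--     while i < len(a) and j < len(e):
--         if a[i] == e[j]:
--             i += 1
--             j += 1
--         elif a[i] < e[j]:
--             extra.append(a[i])
--             i += 1
--         else:
--             missing.append(e[j])
--             j += 1
--     extra.extend(a[i:])
--     missing.extend(e[j:])
--     out = []
--     if missing:
--         out.append(f"{actual_name} missing effect types: {missing}")
--     if extra: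
--         out.append(f"{actual_name} has unknown effect types: {extra}")
--     return out
-- ===== Notes on version B (the rewrite author's own statement) =====
-- stated objective: alternative
-- what changed: Instead of computing two set differences and sorting each difference, B sorts both normalised sets once and walks them with a single two-pointer merge that collects the missing and extra elements simultaneously in sorted order.
import Mathlib
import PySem

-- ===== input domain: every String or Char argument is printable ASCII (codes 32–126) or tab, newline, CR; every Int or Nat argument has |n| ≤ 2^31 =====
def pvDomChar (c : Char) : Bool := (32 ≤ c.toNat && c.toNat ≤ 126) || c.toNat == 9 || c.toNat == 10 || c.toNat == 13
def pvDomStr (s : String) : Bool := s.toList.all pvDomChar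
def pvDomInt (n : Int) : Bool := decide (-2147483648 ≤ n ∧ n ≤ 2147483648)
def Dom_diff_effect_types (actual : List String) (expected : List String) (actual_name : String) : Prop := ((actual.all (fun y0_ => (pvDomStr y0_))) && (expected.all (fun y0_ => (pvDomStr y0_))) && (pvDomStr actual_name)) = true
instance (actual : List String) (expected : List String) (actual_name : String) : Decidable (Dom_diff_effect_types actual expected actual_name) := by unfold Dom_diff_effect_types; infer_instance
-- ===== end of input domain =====

-- B replaces A's two set differences + two sorts of the differences by sorting both
-- normalised sets once and walking them with a single two-pointer merge that collects
-- 'missing' and 'extra' simultaneously (objective: alternative decomposition, same cost).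

-- ===== PORT A =====
-- Shared helpers (identical Python subexpressions of A and B): Python repr of a string
-- (exact on the stated printable-ASCII + tab/newline/CR domain), str(list of str), and
-- the two conditional f-string messages of the shared epilogue.
def pvEsc (q : Char) (c : Char) : List Char :=
  if c = '\\' then ['\\', '\\']
  else if c = q then ['\\', q]
  else if c = '\t' then ['\\', 't']
  else if c = '\n' then ['\\', 'n']
  else if c = '\r' then ['\\', 'r']
  else [c]

def pvRepr (s : String) : String :=
  let cs := s.toList
  let q : Char := if cs.contains '\'' && !(cs.contains '"') then '"' else '\''
  String.ofList ([q] ++ cs.flatMap (pvEsc q) ++ [q])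

def pvReprList (l : List String) : String :=
  "[" ++ String.intercalate ", " (l.map pvRepr) ++ "]"

-- the out-building epilogue shared verbatim by A and B
def pvEmit (actual_name : String) (missing : List String) (extra : List String) : List String :=
  let out : List String := []
  let out := if missing.isEmpty then out
             else out ++ [actual_name ++ " missing effect types: " ++ pvReprList missing]
  if extra.isEmpty then out
  else out ++ [actual_name ++ " has unknown effect types: " ++ pvReprList extra]

-- 'actual or set()' is a no-op on a list argument (set([]) is already the empty set);
-- str(x) is the identity on str, and 'if str(x)' keeps exactly the nonempty strings,
-- so each set comprehension is a filter of the deduplicated input.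
def diff_effect_types (actual : List String) (expected : List String) (actual_name : String) : List String :=
  let actual_set : PySem.Set String := (PySem.Set.ofList actual).filter (fun x => x != "")
  let expected_set : PySem.Set String := (PySem.Set.ofList expected).filter (fun x => x != "")
  let missing := PySem.List.sorted (PySem.Set.diff expected_set actual_set) (fun x => x)
  let extra := PySem.List.sorted (PySem.Set.diff actual_set expected_set) (fun x => x)
  pvEmit actual_name missing extra

-- ===== PORT B =====
-- the two-pointer merge walk of Source B: (missing, extra) from the two sorted lists
def pvMerge : List String → List String → List String × List String
  | xs, [] => ([], xs)
  | [], y :: ys => (y :: ys, [])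
  | x :: xs, y :: ys =>
    if x = y then pvMerge xs ys
    else if x < y then
      let r := pvMerge xs (y :: ys)
      (r.1, x :: r.2)
    else
      let r := pvMerge (x :: xs) ys
      (y :: r.1, r.2)
  termination_by xs ys => xs.length + ys.length
  decreasing_by all_goals (simp only [List.length_cons]; omega)

def diff_effect_types_alt (actual : List String) (expected : List String) (actual_name : String) : List String :=
  let a := PySem.List.sorted ((PySem.Set.ofList actual).filter (fun x => x != "")) (fun x => x)
  let e := PySem.List.sorted ((PySem.Set.ofList expected).filter (fun x => x != "")) (fun x => x)
  let r := pvMerge a e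
  pvEmit actual_name r.1 r.2

-- ===== PRECONDITION & SPEC =====
def Spec_diff_effect_types (actual : List String) (expected : List String) (actual_name : String) (out : List String) : Prop := out = diff_effect_types_alt actual expected actual_name
instance (actual : List String) (expected : List String) (actual_name : String) (out : List String) : Decidable (Spec_diff_effect_types actual expected actual_name out) := by unfold Spec_diff_effect_types; infer_instance

-- ===== CLAIM (what is proved, stated in full; the proofs are below) =====
def Claim_equal_diff_effect_types : Prop := ∀ (actual : List String) (expected : List String) (actual_name : String), Dom_diff_effect_types actual expected actual_name → Spec_diff_effect_types actual expected actual_name (diff_effect_types actual expected actual_name)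

-- ===== LEMMAS AND PROOFS =====

-- the merge walk on two strictly increasing lists computes exactly the two differences
theorem pvMerge_eq (xs ys : List String) (hx : xs.Pairwise (· < ·)) (hy : ys.Pairwise (· < ·)) :
    pvMerge xs ys = (ys.filter (fun y => !xs.contains y), xs.filter (fun x => !ys.contains x)) := by
  induction xs, ys using pvMerge.induct with
  | case1 xs => simp [pvMerge]
  | case2 y ys => simp [pvMerge]
  | case3 xs y ys ih =>
    rw [List.pairwise_cons] at hx hy
    have h1 : (y :: ys).filter (fun z => !(y :: xs).contains z)
        = ys.filter (fun z => !xs.contains z) := by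
      rw [List.filter_cons_of_neg (by simp), List.filter_congr]
      intro z hz
      simp [ne_of_gt (hy.1 z hz)]
    have h2 : (y :: xs).filter (fun z => !(y :: ys).contains z)
        = xs.filter (fun z => !ys.contains z) := by
      rw [List.filter_cons_of_neg (by simp), List.filter_congr]
      intro z hz
      simp [ne_of_gt (hx.1 z hz)]
    rw [show pvMerge (y :: xs) (y :: ys) = pvMerge xs ys by simp [pvMerge]]
    rw [ih hx.2 hy.2, h1, h2]
  | case4 x xs y ys hne hlt ih =>
    rw [List.pairwise_cons] at hx hy
    have hxz : ∀ z ∈ y :: ys, x < z := by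
      intro z hz
      rcases List.mem_cons.mp hz with rfl | hz
      · exact hlt
      · exact lt_trans hlt (hy.1 z hz)
    have h1 : (y :: ys).filter (fun z => !(x :: xs).contains z)
        = (y :: ys).filter (fun z => !xs.contains z) := by
      apply List.filter_congr
      intro z hz
      simp [ne_of_gt (hxz z hz)]
    have h2 : (x :: xs).filter (fun z => !(y :: ys).contains z)
        = x :: xs.filter (fun z => !(y :: ys).contains z) := by
      rw [List.filter_cons_of_pos]
      simp only [Bool.not_eq_eq_eq_not, Bool.not_true, List.contains_eq_mem,
        decide_eq_false_iff_not]
      intro hmem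
      exact absurd rfl (ne_of_gt (hxz x hmem))
    rw [show pvMerge (x :: xs) (y :: ys)
        = ((pvMerge xs (y :: ys)).1, x :: (pvMerge xs (y :: ys)).2) by
      simp [pvMerge, hne, hlt]]
    rw [ih hx.2 (List.pairwise_cons.mpr hy), h1, h2]
  | case5 x xs y ys hne hnlt ih =>
    rw [List.pairwise_cons] at hx hy
    have hgt : y < x := lt_of_le_of_ne (not_lt.mp hnlt) (fun h => hne h.symm)
    have hyz : ∀ z ∈ x :: xs, y < z := by
      intro z hz
      rcases List.mem_cons.mp hz with rfl | hz
      · exact hgt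
      · exact lt_trans hgt (hx.1 z hz)
    have h1 : (y :: ys).filter (fun z => !(x :: xs).contains z)
        = y :: ys.filter (fun z => !(x :: xs).contains z) := by
      rw [List.filter_cons_of_pos]
      simp only [Bool.not_eq_eq_eq_not, Bool.not_true, List.contains_eq_mem,
        decide_eq_false_iff_not]
      intro hmem
      exact absurd rfl (ne_of_gt (hyz y hmem))
    have h2 : (x :: xs).filter (fun z => !(y :: ys).contains z)
        = (x :: xs).filter (fun z => !ys.contains z) := by
      apply List.filter_congr
      intro z hz
      simp [ne_of_gt (hyz z hz)]
    rw [show pvMerge (x :: xs) (y :: ys)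
        = (y :: (pvMerge (x :: xs) ys).1, (pvMerge (x :: xs) ys).2) by
      simp [pvMerge, hne, hnlt]]
    rw [ih (List.pairwise_cons.mpr hx) hy.2, h1, h2]

-- sorting a nodup list gives a strictly increasing list
theorem pv_sorted_strict (l : List String) (h : l.Nodup) :
    (PySem.List.sorted l (fun x => x)).Pairwise (· < ·) := by
  have hle := PySem.List.sorted_pairwise l (fun x => x)
  have hnd : (PySem.List.sorted l (fun x => x) false).Nodup :=
    (PySem.List.sorted_perm l (fun x => x) false).symm.nodup h
  exact (hle.and hnd).imp (fun h => lt_of_le_of_ne h.1 h.2)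

-- filtering commutes with sorting a nodup list
theorem pv_sorted_filter (l : List String) (p : String → Bool) (h : l.Nodup) :
    PySem.List.sorted (l.filter p) (fun x => x) =
      (PySem.List.sorted l (fun x => x)).filter p := by
  refine PySem.List.sorted_eq_of_perm_of_pairwise_lt _ _ _ ?_ ?_
  · exact (PySem.List.sorted_perm l (fun x => x) false).filter p
  · exact (pv_sorted_strict l h).filter p

-- the merge of the two sorted sets equals (sorted missing, sorted extra)
theorem pv_assemble (aSet eSet : List String) (ha : aSet.Nodup) (he : eSet.Nodup) :
    pvMerge (PySem.List.sorted aSet (fun x => x)) (PySem.List.sorted eSet (fun x => x))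
      = (PySem.List.sorted (eSet.filter (fun z => !aSet.contains z)) (fun x => x),
         PySem.List.sorted (aSet.filter (fun z => !eSet.contains z)) (fun x => x)) := by
  rw [pvMerge_eq _ _ (pv_sorted_strict aSet ha) (pv_sorted_strict eSet he)]
  rw [pv_sorted_filter eSet _ he, pv_sorted_filter aSet _ ha]
  congr 1
  · apply List.filter_congr; intro z hz
    simp [List.contains_eq_mem, PySem.List.mem_sorted]
  · apply List.filter_congr; intro z hz
    simp [List.contains_eq_mem, PySem.List.mem_sorted]

-- ===== VERDICT (by name: the statement is the Claim_ definition above) =====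
theorem diff_effect_types_spec : Claim_equal_diff_effect_types := by
  intro actual expected actual_name _
  unfold Spec_diff_effect_types diff_effect_types diff_effect_types_alt
  simp only [PySem.Set.diff, PySem.Set.contains]
  rw [pv_assemble _ _ ((PySem.Set.nodup_ofList actual).filter _)
    ((PySem.Set.nodup_ofList expected).filter _)]
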